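-- pv_equiv track=rewrite | github.com/tausif04/Python_Practise | OOP 2 LAB/Mid_2_b.py | common_subjects_list
-- ===== SOURCE A (Python) =====
-- def common_subjects_list(student_data):
--     common_sub=None
--     for student,data in student_data.items():
--         if common_sub is None:
--             common_sub=data['favourites']
--         else:
--             common_sub=common_sub.intersection(data['favourites'])
--     return common_sub
-- ===== SOURCE B (Python) =====
-- def common_subjects_list(student_data):
--     sets = [data['favourites'] for data in student_data.values()]
--     if not sets:
--         return None
--     counts = {}
--     for fav in sets:
--         for subject in fav:
--             counts[subject] = counts.get(subject, 0) + 1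
--     n = len(sets)
--     return {subject for subject, c in counts.items() if c == n}
-- ===== Notes on version B (the rewrite author's own statement) =====
-- stated objective: alternative
-- what changed: Replaces the fold of pairwise set intersections with a single counting pass: tally every subject's occurrences across all students' favourite sets and keep those whose count equals the number of students.
-- outside the precondition, e.g. on common_subjects_list({}): A returns None, B returns None; on common_subjects_list({'s1': {}}): A raises KeyError, B raises KeyError
import Mathlib
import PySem

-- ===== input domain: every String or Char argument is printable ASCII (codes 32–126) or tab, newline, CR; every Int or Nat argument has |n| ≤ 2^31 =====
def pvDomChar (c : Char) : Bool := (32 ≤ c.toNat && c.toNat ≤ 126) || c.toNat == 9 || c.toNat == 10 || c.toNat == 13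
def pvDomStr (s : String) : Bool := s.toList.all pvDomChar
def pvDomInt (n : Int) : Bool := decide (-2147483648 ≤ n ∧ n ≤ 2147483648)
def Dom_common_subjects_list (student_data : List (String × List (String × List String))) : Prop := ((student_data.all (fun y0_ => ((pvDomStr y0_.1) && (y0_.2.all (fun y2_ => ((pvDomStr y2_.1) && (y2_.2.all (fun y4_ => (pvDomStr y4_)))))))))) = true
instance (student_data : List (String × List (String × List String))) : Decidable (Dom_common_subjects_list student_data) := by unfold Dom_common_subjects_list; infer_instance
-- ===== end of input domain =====

-- B replaces A's fold of pairwise set intersections by one counting pass (subjects kept iff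
-- their count across students equals the number of students); equivalence of return values is proved.

-- ===== PORT A =====
-- data['favourites'] (first-match dict lookup; a missing key is a KeyError = none, excluded by Pre_)
def pyFav (d : List (String × List String)) : List String :=
  ((PySem.Dict.mk d).get? "favourites").getD []

def common_subjects_list (student_data : List (String × List (String × List String))) : List String :=
  -- common_sub = None; for student, data in items: first set, then intersections; return common_sub
  (student_data.foldl
    (fun (common_sub : Option (List String)) p =>
      match common_sub with
      | none => some (pyFav p.2)
      | some s => some (PySem.Set.inter s (pyFav p.2)))
    none).getD []   -- the None returned on an empty dict is excluded by Pre_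

-- ===== PORT B =====
def common_subjects_list_alt (student_data : List (String × List (String × List String))) : List String :=
  let sets := student_data.map (fun p => pyFav p.2)
  if sets.isEmpty then [] else   -- Python B returns None here; excluded by Pre_
    let counts := sets.foldl
      (fun (c : PySem.Dict String Int) fav =>
        fav.foldl (fun c subject => c.insert subject (c.getD subject 0 + 1)) c)
      PySem.Dict.empty
    let n : Int := sets.length
    PySem.Set.ofList ((counts.items.filter (fun kv => kv.2 == n)).map Prod.fst)

-- ===== PRECONDITION & SPEC =====
-- Pre_ excludes the empty dict (A returns None, not a set), students whose record lacks the
-- 'favourites' key (A raises KeyError), and favourites lists with duplicates (a Python set has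
-- distinct elements, so such lists encode no Python input).
def Pre_common_subjects_list (student_data : List (String × List (String × List String))) : Prop :=
  student_data ≠ [] ∧
  ∀ p ∈ student_data, ∃ fav, (PySem.Dict.mk p.2).get? "favourites" = some fav ∧ fav.Nodup
instance (student_data : List (String × List (String × List String))) : Decidable (Pre_common_subjects_list student_data) := by unfold Pre_common_subjects_list; infer_instance

def pvWitness_common_subjects_list : (List (String × List (String × List String))) :=
  [("ann", [("favourites", ["math", "phys"])]), ("bob", [("favourites", ["phys", "chem"])])]

def Spec_common_subjects_list (student_data : List (String × List (String × List String))) (out : List String) : Prop := out = common_subjects_list_alt student_data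
instance (student_data : List (String × List (String × List String))) (out : List String) : Decidable (Spec_common_subjects_list student_data out) := by unfold Spec_common_subjects_list; infer_instance

-- ===== CLAIM (what is proved, stated in full; the proofs are below) =====
def Claim_equal_common_subjects_list : Prop := ∀ (student_data : List (String × List (String × List String))), Dom_common_subjects_list student_data → Pre_common_subjects_list student_data → Spec_common_subjects_list student_data (common_subjects_list student_data)

-- ===== LEMMAS AND PROOFS =====

-- A's loop after the first student filters the first set by membership in all later sets
theorem foldA_eq_filter (rest : List (String × List (String × List String))) :
    ∀ s : List String,
      (rest.foldl
        (fun (common_sub : Option (List String)) p =>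
          match common_sub with
          | none => some (pyFav p.2)
          | some s => some (PySem.Set.inter s (pyFav p.2)))
        (some s)) =
      some (s.filter (fun x => rest.all (fun p => (pyFav p.2).contains x))) := by
  induction rest with
  | nil => intro s; simp
  | cons q rest ih =>
      intro s
      rw [List.foldl_cons]
      show (rest.foldl _ (some (PySem.Set.inter s (pyFav q.2)))) = _
      rw [ih (PySem.Set.inter s (pyFav q.2))]
      simp only [PySem.Set.inter, List.filter_filter, List.all_cons]
      exact congrArg some (List.filter_congr (fun a _ => by rw [Bool.and_comm]; rfl))

theorem count_flatten_le (x : String) :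
    ∀ (ls : List (List String)), (∀ t ∈ ls, t.Nodup) → (ls.flatten.count x : Nat) ≤ ls.length := by
  intro ls
  induction ls with
  | nil => intro _; simp
  | cons t ls ih =>
      intro h
      have h1 : t.count x ≤ 1 := (List.nodup_iff_count_le_one.mp (h t (by simp))) x
      have h2 := ih (fun u hu => h u (by simp [hu]))
      simp only [List.flatten_cons, List.count_append, List.length_cons]
      omega

theorem count_flatten_eq_iff (x : String) :
    ∀ (ls : List (List String)), (∀ t ∈ ls, t.Nodup) →
      (ls.flatten.count x = ls.length ↔ ∀ t ∈ ls, x ∈ t) := by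
  intro ls
  induction ls with
  | nil => intro _; simp
  | cons t ls ih =>
      intro h
      have h1 : t.count x ≤ 1 := (List.nodup_iff_count_le_one.mp (h t (by simp))) x
      have h2 := count_flatten_le x ls (fun u hu => h u (by simp [hu]))
      have h3 := ih (fun u hu => h u (by simp [hu]))
      simp only [List.flatten_cons, List.count_append, List.length_cons, List.mem_cons]
      constructor
      · intro he
        have hxt : x ∈ t := by
          by_contra hx
          have : t.count x = 0 := List.count_eq_zero.mpr hx
          omega
        have : ls.flatten.count x = ls.length := by omega
        exact fun u hu => hu.elim (fun e => e ▸ hxt) (h3.mp this u)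
      · intro hall
        have hxt : x ∈ t := hall t (Or.inl rfl)
        have ht1 : t.count x = 1 := le_antisymm h1 (List.count_pos_iff.mpr hxt)
        have : ls.flatten.count x = ls.length := h3.mpr (fun u hu => hall u (Or.inr hu))
        omega

-- adding elements to a set changes a filter only on elements satisfying p outside the set
theorem filter_update_eq (p : String → Bool) :
    ∀ (r : List String) (s : PySem.Set String), (∀ x ∈ r, p x = true → x ∈ s) →
      (PySem.Set.update s r).filter p = s.filter p := by
  intro r
  induction r with
  | nil => intro s _; rfl
  | cons a r ih =>
      intro s h
      show (PySem.Set.update (PySem.Set.add s a) r).filter p = s.filter p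
      rw [ih (PySem.Set.add s a) (fun x hx hp => by
        exact (PySem.Set.mem_add s a x).mpr (Or.inl (h x (by simp [hx]) hp)))]
      by_cases hm : a ∈ s
      · simp [PySem.Set.add, hm]
      · have hpa : p a = false := by
          by_contra hp
          exact hm (h a (by simp) (eq_true_of_ne_false hp))
        simp [PySem.Set.add, hm, List.filter_append, hpa]

-- nested counting loop = Counter of the concatenation
theorem counts_eq_counter :
    ∀ (sets : List (List String)),
      sets.foldl
        (fun (c : PySem.Dict String Int) fav =>
          fav.foldl (fun c subject => c.insert subject (c.getD subject 0 + 1)) c)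
        PySem.Dict.empty = PySem.Dict.counter sets.flatten := by
  have gen : ∀ (sets : List (List String)) (d : PySem.Dict String Int),
      sets.foldl
        (fun (c : PySem.Dict String Int) fav =>
          fav.foldl (fun c subject => c.insert subject (c.getD subject 0 + 1)) c) d
      = sets.flatten.foldl (fun c subject => c.insert subject (c.getD subject 0 + 1)) d := by
    intro sets
    induction sets with
    | nil => intro d; rfl
    | cons t sets ih =>
        intro d
        simp only [List.foldl_cons, List.flatten_cons, List.foldl_append, ih]
  intro sets
  rw [gen, ← PySem.Dict.foldl_insert_getD_add_one_eq_counter]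

theorem pyFav_nodup {d : List (String × List String)}
    (h : ∃ fav, (PySem.Dict.mk d).get? "favourites" = some fav ∧ fav.Nodup) : (pyFav d).Nodup := by
  obtain ⟨fav, he, hn⟩ := h
  simpa [pyFav, he] using hn

-- ===== VERDICT (by name: the statement is the Claim_ definition above) =====
theorem common_subjects_list_spec : Claim_equal_common_subjects_list := by
  intro sd _dom hpre
  obtain ⟨hne, hall⟩ := hpre
  unfold Spec_common_subjects_list
  obtain ⟨q, rest, rfl⟩ : ∃ q r, sd = q :: r := by
    cases sd with
    | nil => exact absurd rfl hne
    | cons q r => exact ⟨q, r, rfl⟩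
  -- notation
  set f0 := pyFav q.2 with hf0
  set l := rest.map (fun p => pyFav p.2) with hl
  have hf0n : f0.Nodup := pyFav_nodup (hall q (by simp))
  have hln : ∀ t ∈ l, t.Nodup := by
    intro t ht
    obtain ⟨p, hp, rfl⟩ := List.mem_map.mp ht
    exact pyFav_nodup (hall p (by simp [hp]))
  -- A's side
  have hA : common_subjects_list (q :: rest)
      = f0.filter (fun x => rest.all (fun p => (pyFav p.2).contains x)) := by
    unfold common_subjects_list
    rw [List.foldl_cons]
    rw [foldA_eq_filter rest f0]
    rfl
  -- B's side
  have hB : common_subjects_list_alt (q :: rest)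
      = PySem.Set.ofList ((((PySem.Dict.counter (f0 ++ l.flatten)).items.filter
          (fun kv => kv.2 == ((l.length + 1 : Nat) : Int))).map Prod.fst)) := by
    unfold common_subjects_list_alt
    simp only [List.map_cons, List.isEmpty_cons]
    rw [counts_eq_counter]
    simp [hl, hf0]
  rw [hA, hB]
  -- unfold the counter's items
  set flat := f0 ++ l.flatten with hflat
  set n : Int := ((l.length + 1 : Nat) : Int) with hn
  have hitems : ((PySem.Dict.counter flat).items.filter (fun kv => kv.2 == n)).map Prod.fst
      = (PySem.Set.ofList flat).filter (fun k => ((flat.count k : Int) == n)) := by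
    rw [PySem.Dict.items_counter]
    rw [List.filter_map, List.map_map]
    simp [Function.comp_def]
  rw [hitems]
  -- restrict the deduplicated concatenation to the first set
  have hsub : ∀ x ∈ l.flatten, ((flat.count x : Int) == n) = true → x ∈ f0 := by
    intro x _hx hp
    have hcount : flat.count x = l.length + 1 := by
      have h := beq_iff_eq.mp hp
      rw [hn] at h
      exact_mod_cast h
    have hle := count_flatten_le x l hln
    have hsum : f0.count x + l.flatten.count x = l.length + 1 := by
      rw [hflat, List.count_append] at hcount
      exact hcount
    have hpos : 0 < f0.count x := by omega
    exact List.count_pos_iff.mp hpos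
  have hof : PySem.Set.ofList flat = PySem.Set.update (f0 : PySem.Set String) l.flatten := by
    rw [hflat]
    show (f0 ++ l.flatten).foldl PySem.Set.add [] = _
    rw [List.foldl_append]
    have : f0.foldl PySem.Set.add [] = f0 := by
      rw [← PySem.Set.ofList_eq_foldl, PySem.Set.ofList_eq_self_of_nodup f0 hf0n]
    rw [this]
    rfl
  rw [hof, filter_update_eq _ l.flatten f0 hsub]
  -- the filtered first set is duplicate-free, so the final set() is the identity
  rw [PySem.Set.ofList_eq_self_of_nodup _ (hf0n.filter _)]
  -- the two filters agree on elements of the first set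
  refine List.filter_congr ?_
  intro x hx
  have hc1 : f0.count x = 1 := List.count_eq_one_of_mem hf0n hx
  have hiff := count_flatten_eq_iff x l hln
  have hle := count_flatten_le x l hln
  rw [Bool.eq_iff_iff]
  simp only [beq_iff_eq, List.all_eq_true]
  constructor
  · intro hall2
    have hmem : ∀ t ∈ l, x ∈ t := by
      intro t ht
      obtain ⟨p, hp, rfl⟩ := List.mem_map.mp ht
      simpa using hall2 p hp
    have h2 : l.flatten.count x = l.length := hiff.mpr hmem
    have h3 : flat.count x = l.length + 1 := by
      rw [hflat, List.count_append]
      omega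
    rw [hn]
    exact_mod_cast h3
  · intro he p hp
    have hcount : flat.count x = l.length + 1 := by
      rw [hn] at he
      exact_mod_cast he
    have hsum : f0.count x + l.flatten.count x = l.length + 1 := by
      rw [hflat, List.count_append] at hcount
      exact hcount
    have h2 : l.flatten.count x = l.length := by omega
    have hmem := hiff.mp h2 (pyFav p.2) (List.mem_map.mpr ⟨p, hp, rfl⟩)
    simpa using hmem
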